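-- pv_equiv track=rewrite | github.com/Swarm-J/Winc-Backend | for/main.py | alphabet_set
-- ===== SOURCE A (Python) =====
-- def alphabet_set(countries):
--     alphabet = 'abcdefghijklmnopqrstuvwxyz'
--     country_alphabet = ''
--     country_names = []
--     for country in countries:
--         for c in country:
--             if c in alphabet:
--                 if c in country_alphabet:
--                     continue
--                 else:
--                     country_alphabet += c.lower()
--                     if country in country_names:
--                         continue
--                     else:
--                         country_names.append(country)
--             else:
--                 continue
--
--     return country_names
-- ===== SOURCE B (Python) =====
-- def alphabet_set(countries):
--     # Letter-major transposed algorithm: for each of the 26 letters, scan the list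
--     # for the FIRST country containing that letter; the answer is the countries at
--     # the distinct first-occurrence indices, taken in increasing (= input) order.
--     idxs = set()
--     for c in 'abcdefghijklmnopqrstuvwxyz':
--         for i, country in enumerate(countries):
--             if c in country:
--                 idxs.add(i)
--                 break
--     return [countries[i] for i in sorted(idxs)]
-- ===== Notes on version B (the rewrite author's own statement) =====
-- stated objective: alternative
-- what changed: Transposes the loops: instead of A's single country-major scan with an incremental seen-letters string and output-membership dedup, B iterates over the 26 letters and for each one linearly searches for the FIRST country containing it (early break), then returns the countries at the sorted distinct first-occurrence indices.
import Mathlib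
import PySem

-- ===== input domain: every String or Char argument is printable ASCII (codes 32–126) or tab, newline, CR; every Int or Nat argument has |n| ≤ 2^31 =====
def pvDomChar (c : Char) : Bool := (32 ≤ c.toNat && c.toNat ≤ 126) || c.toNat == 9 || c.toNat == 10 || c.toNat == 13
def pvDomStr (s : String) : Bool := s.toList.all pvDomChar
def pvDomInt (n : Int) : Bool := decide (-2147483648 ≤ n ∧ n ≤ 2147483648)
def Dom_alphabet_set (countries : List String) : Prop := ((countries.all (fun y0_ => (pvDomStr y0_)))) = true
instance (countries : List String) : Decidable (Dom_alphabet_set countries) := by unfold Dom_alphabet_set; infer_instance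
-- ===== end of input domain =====

-- B transposes A's loops: instead of A's country-major scan with an incremental seen-letter
-- string and output-membership dedup, B searches, per alphabet letter, for the first country
-- containing it, and selects the countries at the sorted distinct first-occurrence indices;
-- an alternative algorithm of similar cost, proved to return the same list.


-- ===== PORT A =====
-- alphabet = 'abcdefghijklmnopqrstuvwxyz'
def pvAbc : List Char := "abcdefghijklmnopqrstuvwxyz".toList

-- body of A's inner loop; 'c in alphabet' / 'c in country_alphabet' on the 1-char c is
-- exactly character membership; country_alphabet is kept as its list of characters.
def pvStepA (country : String) (st : List Char × List String) (c : Char) : List Char × List String :=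
  if c ∈ pvAbc then
    if c ∈ st.1 then st
    else
      if country ∈ st.2 then (st.1 ++ PySem.Chars.lower [c], st.2)
      else (st.1 ++ PySem.Chars.lower [c], st.2 ++ [country])
  else st

def alphabet_set (countries : List String) : List String :=
  (countries.foldl (fun st country => country.toList.foldl (pvStepA country) st)
    (([] : List Char), ([] : List String))).2

-- ===== PORT B =====
-- B's inner loop: 'for i, country in enumerate(countries): if c in country: …; break'
-- = the first index whose country contains c (none if no country does).
def pvFirstIdx (c : Char) : List (Int × String) → Option Int
  | [] => none
  | (i, s) :: rest => if c ∈ s.toList then some i else pvFirstIdx c rest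

-- outer loop over the 26 letters collecting idxs; then countries[i] for i in sorted(idxs)
def alphabet_set_alt (countries : List String) : List String :=
  (PySem.List.sorted
      (pvAbc.foldl (fun st c =>
          match pvFirstIdx c (PySem.List.enumerate countries 0) with
          | some i => PySem.Set.add st i
          | none => st) (PySem.Set.empty : PySem.Set Int))
      (fun x => x)).map
    (fun i => PySem.List.pyGetD countries i "")

-- ===== PRECONDITION & SPEC =====
def Spec_alphabet_set (countries : List String) (out : List String) : Prop := out = alphabet_set_alt countries
instance (countries : List String) (out : List String) : Decidable (Spec_alphabet_set countries out) := by unfold Spec_alphabet_set; infer_instance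

-- ===== CLAIM (what is proved, stated in full; the proofs are below) =====
def Claim_equal_alphabet_set : Prop := ∀ (countries : List String), Dom_alphabet_set countries → Spec_alphabet_set countries (alphabet_set countries)

-- ===== LEMMAS AND PROOFS =====

-- the new lowercase letters a string contributes, in first-occurrence order, given letters S already seen
def pvNew (S : List Char) : List Char → List Char
  | [] => []
  | c :: cs => if c ∈ pvAbc ∧ c ∉ S then c :: pvNew (S ++ [c]) cs else pvNew S cs

-- common specification: the countries contributing at least one new letter, in order
def pvIntro (S : List Char) : List String → List String
  | [] => []
  | s :: rest => (if pvNew S s.toList = [] then [] else [s]) ++ pvIntro (S ++ pvNew S s.toList) rest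

-- the indices of contributing countries, increasing
def pvIdx (k : Int) (S : List Char) : List String → List Int
  | [] => []
  | s :: rest => (if pvNew S s.toList = [] then [] else [k]) ++ pvIdx (k + 1) (S ++ pvNew S s.toList) rest

lemma pvAbc_eq : pvAbc = ['a','b','c','d','e','f','g','h','i','j','k','l','m','n','o','p','q','r','s','t','u','v','w','x','y','z'] := by decide

lemma pvLower_of_mem : ∀ c ∈ pvAbc, PySem.Chars.lower [c] = [c] := by
  intro c hc
  rw [pvAbc_eq] at hc
  fin_cases hc <;> rfl

lemma mem_pvNew_append : ∀ (cs S : List Char) (c : Char),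
    c ∈ S ++ pvNew S cs ↔ c ∈ S ∨ (c ∈ pvAbc ∧ c ∈ cs) := by
  intro cs
  induction cs with
  | nil => intro S c; simp [pvNew]
  | cons c0 cs ih =>
    intro S c
    by_cases h0 : c0 ∈ pvAbc ∧ c0 ∉ S
    · have : S ++ pvNew S (c0 :: cs) = (S ++ [c0]) ++ pvNew (S ++ [c0]) cs := by
        simp [pvNew, h0]
      rw [this, ih (S ++ [c0]) c]
      simp only [List.mem_append, List.mem_cons, List.not_mem_nil, or_false]
      constructor
      · rintro ((h | rfl) | ⟨ha, hc⟩)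
        · exact Or.inl h
        · exact Or.inr ⟨h0.1, Or.inl rfl⟩
        · exact Or.inr ⟨ha, Or.inr hc⟩
      · rintro (h | ⟨ha, rfl | hc⟩)
        · exact Or.inl (Or.inl h)
        · exact Or.inl (Or.inr rfl)
        · exact Or.inr ⟨ha, hc⟩
    · have : S ++ pvNew S (c0 :: cs) = S ++ pvNew S cs := by
        simp [pvNew, h0]
      rw [this, ih S c]
      simp only [List.mem_cons]
      constructor
      · rintro (h | ⟨ha, hc⟩)
        · exact Or.inl h
        · exact Or.inr ⟨ha, Or.inr hc⟩
      · rintro (h | ⟨ha, rfl | hc⟩)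
        · exact Or.inl h
        · rcases Decidable.em (c ∈ S) with hS | hS
          · exact Or.inl hS
          · exact absurd ⟨ha, hS⟩ h0
        · exact Or.inr ⟨ha, hc⟩

lemma pvNew_eq_nil_iff : ∀ (cs S : List Char),
    pvNew S cs = [] ↔ ∀ c ∈ cs, c ∈ pvAbc → c ∈ S := by
  intro cs
  induction cs with
  | nil => intro S; simp [pvNew]
  | cons c0 cs ih =>
    intro S
    by_cases h0 : c0 ∈ pvAbc ∧ c0 ∉ S
    · simp only [pvNew, if_pos h0]
      constructor
      · intro h; cases h
      · intro h; exact absurd (h c0 (by simp) h0.1) h0.2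
    · simp only [pvNew, if_neg h0, ih S]
      constructor
      · intro h c hc ha
        rcases List.mem_cons.mp hc with rfl | hc
        · rcases Decidable.em (c ∈ S) with hS | hS
          · exact hS
          · exact absurd ⟨ha, hS⟩ h0
        · exact h c hc ha
      · intro h c hc ha
        exact h c (by simp [hc]) ha

-- A's two nested folds compute pvIntro -------------------------------------

lemma A_inner (country : String) : ∀ (cs : List Char) (S : List Char) (names : List String),
    cs.foldl (pvStepA country) (S, names)
      = (S ++ pvNew S cs, if pvNew S cs = [] ∨ country ∈ names then names else names ++ [country]) := by
  intro cs
  induction cs with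
  | nil => intro S names; simp [pvNew]
  | cons c cs ih =>
    intro S names
    by_cases habc : c ∈ pvAbc
    · by_cases hS : c ∈ S
      · have hcond : ¬ (c ∈ pvAbc ∧ c ∉ S) := fun h => h.2 hS
        simp only [List.foldl_cons, pvStepA, if_pos habc, if_pos hS, pvNew, if_neg hcond]
        exact ih S names
      · have hcond : c ∈ pvAbc ∧ c ∉ S := ⟨habc, hS⟩
        by_cases hn : country ∈ names
        · simp only [List.foldl_cons, pvStepA, if_pos habc, if_neg hS, if_pos hn,
            pvNew, if_pos hcond, pvLower_of_mem c habc]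
          rw [ih (S ++ [c]) names]
          simp [List.append_assoc, hn]
        · simp only [List.foldl_cons, pvStepA, if_pos habc, if_neg hS, if_neg hn,
            pvNew, if_pos hcond, pvLower_of_mem c habc]
          rw [ih (S ++ [c]) (names ++ [country])]
          simp [List.append_assoc, hn]
    · have hcond : ¬ (c ∈ pvAbc ∧ c ∉ S) := fun h => habc h.1
      simp only [List.foldl_cons, pvStepA, if_neg habc, pvNew, if_neg hcond]
      exact ih S names

lemma A_outer : ∀ (countries : List String) (S : List Char) (names : List String),
    (∀ n ∈ names, ∀ c ∈ n.toList, c ∈ pvAbc → c ∈ S) →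
    (countries.foldl (fun st country => country.toList.foldl (pvStepA country) st) (S, names)).2
      = names ++ pvIntro S countries := by
  intro countries
  induction countries with
  | nil => intro S names _; simp [pvIntro]
  | cons s rest ih =>
    intro S names hinv
    simp only [List.foldl_cons, A_inner s s.toList S names, pvIntro]
    by_cases hnil : pvNew S s.toList = []
    · have hinv' : ∀ n ∈ names, ∀ c ∈ n.toList, c ∈ pvAbc → c ∈ S ++ pvNew S s.toList :=
        fun n hn c hc ha => List.mem_append_left _ (hinv n hn c hc ha)
      simp only [if_pos (Or.inl hnil), if_pos hnil]
      rw [ih _ names hinv']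
      simp
    · have hns : s ∉ names := by
        intro hmem
        exact hnil ((pvNew_eq_nil_iff s.toList S).mpr (hinv s hmem))
      have hinv' : ∀ n ∈ names ++ [s], ∀ c ∈ n.toList, c ∈ pvAbc → c ∈ S ++ pvNew S s.toList := by
        intro n hn c hc ha
        rcases List.mem_append.mp hn with hn | hn
        · exact List.mem_append_left _ (hinv n hn c hc ha)
        · simp only [List.mem_singleton] at hn; subst hn
          exact (mem_pvNew_append n.toList S c).mpr (Or.inr ⟨ha, hc⟩)
      have hcond : ¬ (pvNew S s.toList = [] ∨ s ∈ names) := by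
        rintro (h | h)
        · exact hnil h
        · exact hns h
      simp only [if_neg hcond, if_neg hnil]
      rw [ih _ (names ++ [s]) hinv']
      simp [List.append_assoc]

lemma A_char : ∀ countries : List String, alphabet_set countries = pvIntro [] countries := by
  intro countries
  unfold alphabet_set
  rw [A_outer countries [] []]
  · simp
  · intro n hn; cases hn

-- B computes pvIntro too ----------------------------------------------------

lemma pvIdx_lb : ∀ (countries : List String) (k : Int) (S : List Char) (v : Int),
    v ∈ pvIdx k S countries → k ≤ v := by
  intro countries
  induction countries with
  | nil => intro k S v hv; cases hv
  | cons s rest ih =>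
    intro k S v hv
    by_cases hnil : pvNew S s.toList = []
    · simp only [pvIdx, if_pos hnil, List.nil_append] at hv
      have := ih (k + 1) _ v hv
      omega
    · simp only [pvIdx, if_neg hnil, List.singleton_append, List.mem_cons] at hv
      rcases hv with rfl | hv
      · exact le_refl v
      · have := ih (k + 1) _ v hv
        omega

lemma pvIdx_pairwise : ∀ (countries : List String) (k : Int) (S : List Char),
    (pvIdx k S countries).Pairwise (· < ·) := by
  intro countries
  induction countries with
  | nil => intro k S; simp [pvIdx]
  | cons s rest ih =>
    intro k S
    by_cases hnil : pvNew S s.toList = []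
    · simp only [pvIdx, if_pos hnil, List.nil_append]
      exact ih (k + 1) _
    · simp only [pvIdx, if_neg hnil, List.singleton_append]
      refine List.pairwise_cons.mpr ⟨fun v hv => ?_, ih (k + 1) _⟩
      have := pvIdx_lb rest (k + 1) _ v hv
      omega

-- membership in B's accumulated index set
lemma mem_foldl_idxs : ∀ (cs : List Char) (st : PySem.Set Int) (E : List (Int × String)) (i : Int),
    i ∈ cs.foldl (fun st c =>
        match pvFirstIdx c E with
        | some j => PySem.Set.add st j
        | none => st) st
      ↔ i ∈ st ∨ ∃ c ∈ cs, pvFirstIdx c E = some i := by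
  intro cs
  induction cs with
  | nil => intro st E i; simp
  | cons c0 cs ih =>
    intro st E i
    simp only [List.foldl_cons]
    cases h0 : pvFirstIdx c0 E with
    | none =>
      rw [ih st E i]
      simp only [List.mem_cons]
      constructor
      · rintro (h | ⟨c, hc, hfi⟩)
        · exact Or.inl h
        · exact Or.inr ⟨c, Or.inr hc, hfi⟩
      · rintro (h | ⟨c, rfl | hc, hfi⟩)
        · exact Or.inl h
        · rw [h0] at hfi; cases hfi
        · exact Or.inr ⟨c, hc, hfi⟩
    | some j =>
      rw [ih (PySem.Set.add st j) E i]
      rw [PySem.Set.mem_add]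
      simp only [List.mem_cons]
      constructor
      · rintro ((h | rfl) | ⟨c, hc, hfi⟩)
        · exact Or.inl h
        · exact Or.inr ⟨c0, Or.inl rfl, h0⟩
        · exact Or.inr ⟨c, Or.inr hc, hfi⟩
      · rintro (h | ⟨c, rfl | hc, hfi⟩)
        · exact Or.inl (Or.inl h)
        · rw [h0] at hfi
          exact Or.inl (Or.inr (Option.some.inj hfi).symm)
        · exact Or.inr ⟨c, hc, hfi⟩

lemma nodup_foldl_idxs : ∀ (cs : List Char) (st : PySem.Set Int) (E : List (Int × String)),
    st.Nodup →
    (cs.foldl (fun st c =>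
        match pvFirstIdx c E with
        | some j => PySem.Set.add st j
        | none => st) st).Nodup := by
  intro cs
  induction cs with
  | nil => intro st E h; simpa using h
  | cons c0 cs ih =>
    intro st E h
    cases h0 : pvFirstIdx c0 E with
    | none => simp only [List.foldl_cons, h0]; exact ih st E h
    | some j => simp only [List.foldl_cons, h0]; exact ih _ E (PySem.Set.nodup_add _ _ h)

-- i is an introducing index iff some fresh letter's first-occurrence index is i
lemma pvIdx_mem_iff : ∀ (l : List String) (k : Int) (S : List Char) (i : Int),
    i ∈ pvIdx k S l ↔ ∃ c, c ∈ pvAbc ∧ c ∉ S ∧ pvFirstIdx c (PySem.List.enumerate l k) = some i := by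
  intro l
  induction l with
  | nil =>
    intro k S i
    simp [pvIdx, PySem.List.enumerate, pvFirstIdx]
  | cons s rest ih =>
    intro k S i
    rw [PySem.List.enumerate_cons]
    by_cases hnil : pvNew S s.toList = []
    · have hsub := (pvNew_eq_nil_iff s.toList S).mp hnil
      have h1 : pvIdx k S (s :: rest) = pvIdx (k + 1) S rest := by
        simp [pvIdx, hnil]
      rw [h1, ih (k + 1) S i]
      constructor
      · rintro ⟨c, ha, hS, hfi⟩
        refine ⟨c, ha, hS, ?_⟩
        have hns : c ∉ s.toList := fun hc => hS (hsub c hc ha)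
        simp [pvFirstIdx, hns, hfi]
      · rintro ⟨c, ha, hS, hfi⟩
        have hns : c ∉ s.toList := fun hc => hS (hsub c hc ha)
        simp only [pvFirstIdx, if_neg hns] at hfi
        exact ⟨c, ha, hS, hfi⟩
    · simp only [pvIdx, if_neg hnil, List.singleton_append, List.mem_cons]
      constructor
      · rintro (rfl | hv)
        · have : ¬ ∀ c ∈ s.toList, c ∈ pvAbc → c ∈ S := fun h => hnil ((pvNew_eq_nil_iff s.toList S).mpr h)
          push Not at this
          obtain ⟨c, hc, ha, hS⟩ := this
          refine ⟨c, ha, hS, ?_⟩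
          simp [pvFirstIdx, hc]
        · obtain ⟨c, ha, hS', hfi⟩ := (ih (k + 1) _ i).mp hv
          have hns : c ∉ S ∧ c ∉ s.toList := by
            constructor
            · intro h; exact hS' ((mem_pvNew_append s.toList S c).mpr (Or.inl h))
            · intro h; exact hS' ((mem_pvNew_append s.toList S c).mpr (Or.inr ⟨ha, h⟩))
          exact ⟨c, ha, hns.1, by simp [pvFirstIdx, hns.2, hfi]⟩
      · rintro ⟨c, ha, hS, hfi⟩
        by_cases hc : c ∈ s.toList
        · simp only [pvFirstIdx, if_pos hc] at hfi
          exact Or.inl (Option.some.inj hfi).symm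
        · simp only [pvFirstIdx, if_neg hc] at hfi
          have hS' : c ∉ S ++ pvNew S s.toList := by
            rw [mem_pvNew_append]
            rintro (h | ⟨_, h⟩)
            · exact hS h
            · exact hc h
          exact Or.inr ((ih (k + 1) _ i).mpr ⟨c, ha, hS', hfi⟩)

-- the map over the sorted indices restores pvIntro
lemma map_get : ∀ (rest : List String) (pre : List String) (S : List Char),
    (pvIdx (pre.length : Int) S rest).map (fun i => PySem.List.pyGetD (pre ++ rest) i "")
      = pvIntro S rest := by
  intro rest
  induction rest with
  | nil => intro pre S; rfl
  | cons s tail ih =>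
    intro pre S
    have hidx : ((pre.length : Int) + 1) = (((pre ++ [s]).length : Int)) := by simp
    have happ : pre ++ s :: tail = (pre ++ [s]) ++ tail := by simp
    by_cases hnil : pvNew S s.toList = []
    · simp only [pvIdx, if_pos hnil, List.nil_append, pvIntro]
      rw [hidx, happ, ih (pre ++ [s]) (S ++ pvNew S s.toList)]
    · simp only [pvIdx, if_neg hnil, List.singleton_append, pvIntro, List.map_cons]
      rw [hidx, happ, ih (pre ++ [s]) (S ++ pvNew S s.toList)]
      have hget : PySem.List.pyGetD ((pre ++ [s]) ++ tail) (pre.length : Int) "" = s := by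
        rw [PySem.List.pyGetD_natCast]
        simp [List.getD]
      rw [hget]

lemma B_char : ∀ countries : List String, alphabet_set_alt countries = pvIntro [] countries := by
  intro countries
  unfold alphabet_set_alt
  have hperm : (pvIdx 0 [] countries).Perm
      (pvAbc.foldl (fun st c =>
          match pvFirstIdx c (PySem.List.enumerate countries 0) with
          | some i => PySem.Set.add st i
          | none => st) (PySem.Set.empty : PySem.Set Int)) := by
    refine (List.perm_ext_iff_of_nodup
        ((pvIdx_pairwise countries 0 []).imp (fun h => ne_of_lt h))
        (nodup_foldl_idxs pvAbc _ _ (by simp [PySem.Set.empty]))).mpr ?_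
    intro i
    rw [pvIdx_mem_iff countries 0 [] i,
      mem_foldl_idxs pvAbc _ (PySem.List.enumerate countries 0) i]
    constructor
    · rintro ⟨c, ha, _, hfi⟩
      exact Or.inr ⟨c, ha, hfi⟩
    · rintro (h | ⟨c, ha, hfi⟩)
      · simp [PySem.Set.empty] at h
      · exact ⟨c, ha, by simp, hfi⟩
  rw [PySem.List.sorted_eq_of_perm_of_pairwise_lt _ _ _ hperm (pvIdx_pairwise countries 0 [])]
  have := map_get countries [] []
  simpa using this

-- ===== VERDICT (by name: the statement is the Claim_ definition above) =====
theorem alphabet_set_spec : Claim_equal_alphabet_set := by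
  intro countries _
  unfold Spec_alphabet_set
  rw [A_char, B_char]
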